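-- pv_equiv track=rewrite | github.com/pajka2T/Concurrency-theory | Graf_zaleznosci/main.py | create_word_graph
-- ===== SOURCE A (Python) =====
-- def create_word_graph(dependent_relations: list[tuple[str, str]], word: list[str]) -> list[list[int]]:
--     """
--     Creates word graph with all edges.
--     :param dependent_relations: Dependent relations between all chars.
--     :param word: Word witch graph will be returned.
--     :return: Graph of specified word with all edges, where numbers accord to index of character in word.
--     """
--     graph = [[] for _ in range(len(word))]
--     for i in range(len(word)):
--         curr_char = word[i]
--         for j in range(i+1, len(word)):
--             next_char = word[j]
--             if (curr_char, next_char) in dependent_relations: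
--                 graph[i].append(j)
--     return graph
-- ===== SOURCE B (Python) =====
-- def create_word_graph(dependent_relations: list[tuple[str, str]], word: list[str]) -> list[list[int]]:
--     # Index positions of each character and successors of each character once,
--     # then emit only real edges instead of testing every (i, j) pair against the relation list.
--     pos = {}
--     for j, ch in enumerate(word):
--         pos.setdefault(ch, []).append(j)
--     succ = {}
--     for a, b in dependent_relations:
--         succ.setdefault(a, set()).add(b)
--     graph = []
--     for i, ch in enumerate(word):
--         row = []
--         for b in succ.get(ch, ()):
--             row.extend(j for j in pos.get(b, ()) if j > i)
--         row.sort()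
--         graph.append(row)
--     return graph
-- ===== Notes on version B (the rewrite author's own statement) =====
-- stated objective: faster
-- what changed: Instead of scanning every position pair (i,j) and testing the pair of characters against the relation list each time, B builds a position index per character and a successor-set per character once, emits for each i only the actual edge targets, and sorts each adjacency row.
import Mathlib
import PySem

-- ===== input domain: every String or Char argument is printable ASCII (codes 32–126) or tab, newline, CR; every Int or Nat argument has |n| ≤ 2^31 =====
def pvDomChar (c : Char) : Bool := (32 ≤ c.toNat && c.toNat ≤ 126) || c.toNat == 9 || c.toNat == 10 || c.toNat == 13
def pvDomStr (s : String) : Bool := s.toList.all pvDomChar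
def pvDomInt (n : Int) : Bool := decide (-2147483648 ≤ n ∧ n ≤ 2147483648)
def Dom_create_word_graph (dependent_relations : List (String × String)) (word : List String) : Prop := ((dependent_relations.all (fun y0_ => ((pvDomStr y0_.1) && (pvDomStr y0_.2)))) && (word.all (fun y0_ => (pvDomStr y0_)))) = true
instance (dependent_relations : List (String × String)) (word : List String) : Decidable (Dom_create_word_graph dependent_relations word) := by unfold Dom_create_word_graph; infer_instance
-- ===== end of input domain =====

-- B replaces A's all-pairs scan (with a linear relation-list membership test per pair) by a
-- character→positions index plus a character→successor-set index, emitting only real edges and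
-- sorting each adjacency row; same return value, measured faster.

-- ===== PORT A =====
def create_word_graph (dependent_relations : List (String × String)) (word : List String) : List (List Int) :=
  let n : Int := (word.length : Int)
  let graph0 : List (List Int) := (PySem.List.pyRange 0 n 1).map (fun _ => ([] : List Int))
  (PySem.List.pyRange 0 n 1).foldl (fun graph i =>
    -- i ∈ range(len(word)), j ∈ range(i+1, len(word)): always in range, so pyGetD/pySetD are exact
    let curr_char := PySem.List.pyGetD word i ""
    (PySem.List.pyRange (i + 1) n 1).foldl (fun graph j =>
      let next_char := PySem.List.pyGetD word j ""
      if (curr_char, next_char) ∈ dependent_relations then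
        PySem.List.pySetD graph i (PySem.List.pyGetD graph i [] ++ [j])
      else graph) graph) graph0

-- ===== PORT B =====
def create_word_graph_alt (dependent_relations : List (String × String)) (word : List String) : List (List Int) :=
  -- pos: char -> list of its positions (ascending); setdefault+append is Dict.modify
  let pos : PySem.Dict String (List Int) :=
    (PySem.List.enumerate word).foldl
      (fun d p => d.modify p.2 [] (fun l => l ++ [p.1])) PySem.Dict.empty
  -- succ: char -> set of its successor chars in the relations
  let succ : PySem.Dict String (PySem.Set String) :=
    dependent_relations.foldl
      (fun d q => d.modify q.1 PySem.Set.empty (fun s => PySem.Set.add s q.2)) PySem.Dict.empty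
  (PySem.List.enumerate word).foldl
    (fun graph p =>
      let row := (succ.getD p.2 PySem.Set.empty).foldl
        (fun row b => row ++ (pos.getD b []).filter (fun j => decide (p.1 < j))) []
      graph ++ [PySem.List.sorted row (fun x => x)]) []

-- ===== PRECONDITION & SPEC =====
def Spec_create_word_graph (dependent_relations : List (String × String)) (word : List String) (out : List (List Int)) : Prop := out = create_word_graph_alt dependent_relations word
instance (dependent_relations : List (String × String)) (word : List String) (out : List (List Int)) : Decidable (Spec_create_word_graph dependent_relations word out) := by unfold Spec_create_word_graph; infer_instance

-- ===== CLAIM (what is proved, stated in full; the proofs are below) =====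
def Claim_equal_create_word_graph : Prop := ∀ (dependent_relations : List (String × String)) (word : List String), Dom_create_word_graph dependent_relations word → Spec_create_word_graph dependent_relations word (create_word_graph dependent_relations word)

-- ===== LEMMAS AND PROOFS =====

-- the common canonical row: targets j in (i+1..n) with (word[i], word[j]) in the relations
def wgRow (deps : List (String × String)) (word : List String) (i : Int) : List Int :=
  (PySem.List.pyRange (i + 1) (word.length : Int) 1).filter
    (fun j => decide ((PySem.List.pyGetD word i "", PySem.List.pyGetD word j "") ∈ deps))

-- A's outer-loop body, named so the invariant can be stated
def bodyA (deps : List (String × String)) (word : List String)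
    (graph : List (List Int)) (i : Int) : List (List Int) :=
  (PySem.List.pyRange (i + 1) (word.length : Int) 1).foldl (fun graph j =>
    if (PySem.List.pyGetD word i "", PySem.List.pyGetD word j "") ∈ deps then
      PySem.List.pySetD graph i (PySem.List.pyGetD graph i [] ++ [j])
    else graph) graph

theorem innerA (deps : List (String × String)) (word : List String) (curr : String)
    (l : List Int) :
    ∀ (g : List (List Int)) (i : Nat) (h : i < g.length),
    l.foldl (fun g j =>
        if (curr, PySem.List.pyGetD word j "") ∈ deps then
          PySem.List.pySetD g (i : Int) (PySem.List.pyGetD g (i : Int) [] ++ [j])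
        else g) g
      = g.set i (g[i] ++ l.filter (fun j => decide ((curr, PySem.List.pyGetD word j "") ∈ deps))) := by
  induction l with
  | nil =>
    intro g i h
    simp [List.set_getElem_self h]
  | cons j l ih =>
    intro g i h
    by_cases hp : (curr, PySem.List.pyGetD word j "") ∈ deps
    · simp only [List.foldl_cons, if_pos hp, List.filter_cons, decide_eq_true hp, ite_true]
      rw [PySem.List.pySetD_natCast, PySem.List.pyGetD_natCast,
        List.getD_eq_getElem _ _ h, ih _ i (by simpa using h)]
      rw [List.getElem_set_self (by simpa using h), List.set_set, List.append_assoc,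
        List.singleton_append]
    · simp only [List.foldl_cons, if_neg hp, List.filter_cons, decide_eq_false hp,
        Bool.false_eq_true, ite_false]
      exact ih g i h

theorem outerA (deps : List (String × String)) (word : List String) :
    ∀ t : Nat, t ≤ word.length →
    (PySem.List.pyRange 0 (t : Int) 1).foldl (bodyA deps word)
        ((PySem.List.pyRange 0 (word.length : Int) 1).map (fun _ => ([] : List Int)))
      = (PySem.List.pyRange 0 (word.length : Int) 1).map
          (fun k => if k < (t : Int) then wgRow deps word k else []) := by
  intro t
  induction t with
  | zero =>
    intro _
    simp only [Nat.cast_zero]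
    rw [PySem.List.pyRange_one_eq_nil (le_refl 0), List.foldl_nil]
    refine (List.map_congr_left (fun k hk => ?_)).symm
    have h0 : (0 : Int) ≤ k := (PySem.List.mem_pyRange_one.mp hk).1
    rw [if_neg (by omega)]
  | succ t ih =>
    intro ht
    have ht' : t ≤ word.length := Nat.le_of_succ_le ht
    have hcast : ((t + 1 : Nat) : Int) = (t : Int) + 1 := by push_cast; ring
    rw [hcast, PySem.List.pyRange_one_succ_right (by exact_mod_cast Nat.zero_le t),
      List.foldl_append, ih ht', List.foldl_cons, List.foldl_nil]
    have hlen : ((PySem.List.pyRange 0 (word.length : Int) 1).map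
        (fun k => if k < (t : Int) then wgRow deps word k else [])).length = word.length := by
      rw [List.length_map, PySem.List.length_pyRange_one]; omega
    unfold bodyA
    rw [innerA deps word _ _ _ t (by rw [hlen]; omega)]
    have hget : ((PySem.List.pyRange 0 (word.length : Int) 1).map
        (fun k => if k < (t : Int) then wgRow deps word k else []))[t]'(by rw [hlen]; omega) = [] := by
      rw [List.getElem_map, PySem.List.getElem_pyRange_one 0 (word.length : Int) t
        (by rw [PySem.List.length_pyRange_one]; omega)]
      simp
    rw [hget]
    apply List.ext_getElem
    · rw [List.length_set, hlen, List.length_map, PySem.List.length_pyRange_one]; omega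
    · intro u hu1 hu2
      have hu : u < word.length := by
        rw [List.length_set, hlen] at hu1; exact hu1
      rw [List.getElem_set, List.getElem_map,
        PySem.List.getElem_pyRange_one 0 _ u (by rw [PySem.List.length_pyRange_one]; omega),
        List.getElem_map,
        PySem.List.getElem_pyRange_one 0 _ u (by rw [PySem.List.length_pyRange_one]; omega)]
      by_cases hut : t = u
      · subst hut
        rw [if_pos rfl, if_pos (by omega)]
        simp [wgRow]
      · rw [if_neg hut]
        by_cases hlt : (0 : Int) + (u : Int) < (t : Int)
        · rw [if_pos hlt, if_pos (by omega)]
        · rw [if_neg hlt, if_neg (by omega)]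

theorem create_word_graph_eq_spec (deps : List (String × String)) (word : List String) :
    create_word_graph deps word
      = (List.range word.length).map (fun (k : Nat) => wgRow deps word (k : Int)) := by
  have hA : create_word_graph deps word
      = (PySem.List.pyRange 0 (word.length : Int) 1).foldl (bodyA deps word)
          ((PySem.List.pyRange 0 (word.length : Int) 1).map (fun _ => ([] : List Int))) := rfl
  rw [hA, outerA deps word word.length (le_refl _), PySem.List.pyRange_zero_nat, List.map_map]
  refine List.map_congr_left (fun k hk => ?_)
  have hk' : k < word.length := List.mem_range.mp hk
  simp only [Function.comp_apply]
  rw [if_pos (by exact_mod_cast hk')]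

-- ===== B side =====

theorem enumerate_eq (word : List String) :
    ∀ start : Int, PySem.List.enumerate word start
      = (List.range word.length).map (fun (k : Nat) => (start + (k : Int), word.getD k "")) := by
  induction word with
  | nil => intro start; simp [PySem.List.enumerate]
  | cons x t ih =>
    intro start
    show (start, x) :: PySem.List.enumerate t (start + 1) = _
    rw [ih (start + 1)]
    simp only [List.length_cons, List.range_succ_eq_map, List.map_cons, List.map_map]
    refine List.cons_eq_cons.mpr ⟨by simp, ?_⟩
    refine List.map_congr_left (fun k _ => ?_)
    simp only [Function.comp_apply, Nat.succ_eq_add_one, List.getD_cons_succ]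
    refine Prod.ext ?_ rfl
    push_cast; ring

-- like PySem.Dict.getD_foldl_modify_append but keyed by the pair's SECOND component
theorem pos_fold_getD (l : List (Int × String)) :
    ∀ (d : PySem.Dict String (List Int)) (b : String),
    (l.foldl (fun d p => d.modify p.2 [] (fun ls => ls ++ [p.1])) d).getD b []
      = d.getD b [] ++ (l.filter (fun p => p.2 == b)).map (fun p => p.1) := by
  induction l with
  | nil => intro d b; simp
  | cons q l ih =>
    intro d b
    rw [List.foldl_cons, ih, List.filter_cons]
    by_cases h : q.2 = b
    · rw [if_pos (by simpa using h), List.map_cons, PySem.Dict.getD_modify, if_pos h.symm, h,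
        List.append_assoc, List.singleton_append]
    · rw [if_neg (by simpa using h), PySem.Dict.getD_modify, if_neg (fun hh => h hh.symm)]

theorem pos_getD (word : List String) (b : String) :
    ((PySem.List.enumerate word).foldl
        (fun d p => d.modify p.2 [] (fun l => l ++ [p.1])) PySem.Dict.empty).getD b []
      = ((List.range word.length).filter (fun (j : Nat) => word.getD j "" == b)).map
          (fun (j : Nat) => (j : Int)) := by
  rw [pos_fold_getD, enumerate_eq word 0]
  simp only [PySem.Dict.getD_empty, List.nil_append, List.filter_map, List.map_map]
  have hp : ((fun (p : Int × String) => p.2 == b) ∘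
      (fun (k : Nat) => ((0 : Int) + (k : Int), word.getD k "")))
      = fun (k : Nat) => word.getD k "" == b := by
    funext k; simp
  rw [hp]
  refine List.map_congr_left (fun k _ => ?_)
  simp

theorem succ_fold_getD (l : List (String × String)) :
    ∀ (d : PySem.Dict String (PySem.Set String)) (a : String),
    (l.foldl (fun d q => d.modify q.1 PySem.Set.empty (fun s => PySem.Set.add s q.2)) d).getD a
        PySem.Set.empty
      = PySem.Set.update (d.getD a PySem.Set.empty)
          ((l.filter (fun q => q.1 == a)).map (fun q => q.2)) := by
  induction l with
  | nil => intro d a; simp [PySem.Set.update_nil]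
  | cons q l ih =>
    intro d a
    rw [List.foldl_cons, ih, List.filter_cons]
    by_cases h : q.1 = a
    · rw [if_pos (by simpa using h), List.map_cons, PySem.Set.update_cons]
      congr 1
      rw [PySem.Dict.getD_modify, if_pos h.symm, h]
    · rw [if_neg (by simpa using h), PySem.Dict.getD_modify, if_neg (fun hh => h hh.symm)]

theorem mem_succ (deps : List (String × String)) (a b : String) :
    (b ∈ PySem.Set.ofList ((deps.filter (fun q => q.1 == a)).map (fun q => q.2)))
      ↔ (a, b) ∈ deps := by
  rw [PySem.Set.mem_ofList]
  simp only [List.mem_map, List.mem_filter, beq_iff_eq]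
  constructor
  · rintro ⟨q, ⟨hq, hq1⟩, hq2⟩
    have : q = (a, b) := by
      cases q with | mk q1 q2 => simp_all
    simpa [this] using hq
  · intro h
    exact ⟨(a, b), ⟨h, rfl⟩, rfl⟩

-- B's row for index k equals the canonical row
theorem rowB_eq (deps : List (String × String)) (word : List String) (k : Nat)
    (hk : k < word.length) :
    PySem.List.sorted
      (((deps.foldl (fun d q => d.modify q.1 PySem.Set.empty (fun s => PySem.Set.add s q.2))
            PySem.Dict.empty).getD (word.getD k "") PySem.Set.empty).foldl
        (fun row b =>
          row ++ (((PySem.List.enumerate word).foldl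
              (fun d p => d.modify p.2 [] (fun l => l ++ [p.1])) PySem.Dict.empty).getD b
              []).filter (fun j => decide ((k : Int) < j))) [])
      (fun x => x)
      = wgRow deps word (k : Int) := by
  rw [succ_fold_getD deps PySem.Dict.empty (word.getD k "")]
  simp only [PySem.Dict.getD_empty, PySem.Set.update_empty]
  rw [PySem.List.foldl_append_eq_flatMap, List.nil_append]
  apply PySem.List.sorted_eq_of_perm_of_pairwise_lt
  · -- wgRow ~ the flatMap
    rw [List.perm_ext_iff_of_nodup]
    · intro x
      unfold wgRow
      simp only [List.mem_flatMap, List.mem_filter, PySem.List.mem_pyRange_one,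
        decide_eq_true_eq, pos_getD, mem_succ, List.mem_map, List.mem_range, beq_iff_eq]
      constructor
      · rintro ⟨⟨hx1, hx2⟩, hx3⟩
        have hx0 : (0 : Int) ≤ x := by omega
        obtain ⟨j, rfl⟩ : ∃ j : Nat, x = (j : Int) := ⟨x.toNat, (Int.toNat_of_nonneg hx0).symm⟩
        have hj : j < word.length := by exact_mod_cast hx2
        have h1 : PySem.List.pyGetD word ((k : Nat) : Int) "" = word.getD k "" := by simp
        have h2 : PySem.List.pyGetD word ((j : Nat) : Int) "" = word.getD j "" := by simp
        rw [h1, h2] at hx3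
        exact ⟨word.getD j "", hx3, ⟨⟨j, ⟨hj, rfl⟩, rfl⟩, by exact_mod_cast hx1⟩⟩
      · rintro ⟨b, hb, ⟨⟨j, ⟨hj, hcj⟩, rfl⟩, hkj⟩⟩
        refine ⟨⟨by exact_mod_cast hkj, by exact_mod_cast hj⟩, ?_⟩
        have h1 : PySem.List.pyGetD word ((k : Nat) : Int) "" = word.getD k "" := by simp
        have h2 : PySem.List.pyGetD word ((j : Nat) : Int) "" = word.getD j "" := by simp
        rw [h1, h2, hcj]
        exact hb
    · exact (PySem.List.nodup_pyRange_one _ _).filter _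
    · rw [List.nodup_flatMap]
      constructor
      · intro b _
        apply List.Nodup.filter
        rw [pos_getD]
        exact ((List.nodup_range).filter _).map (fun x y h => by exact_mod_cast h)
      · have hnd := PySem.Set.nodup_ofList
          ((deps.filter (fun q => q.1 == word.getD k "")).map (fun q => q.2))
        refine hnd.imp ?_
        intro b b' hne
        intro x hxb hxb'
        simp only [pos_getD, List.mem_filter, List.mem_map, List.mem_range, beq_iff_eq,
          decide_eq_true_eq] at hxb hxb'
        obtain ⟨⟨j, ⟨_, hcj⟩, rfl⟩, _⟩ := hxb
        obtain ⟨⟨j', ⟨_, hcj'⟩, hjj⟩, _⟩ := hxb'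
        have : j = j' := by exact_mod_cast hjj.symm
        exact hne (by rw [← hcj, ← hcj', this])
  · exact List.Pairwise.filter _ (PySem.List.pairwise_lt_pyRange_one _ _)

theorem create_word_graph_alt_eq_spec (deps : List (String × String)) (word : List String) :
    create_word_graph_alt deps word
      = (List.range word.length).map (fun (k : Nat) => wgRow deps word (k : Int)) := by
  simp only [create_word_graph_alt]
  rw [PySem.List.foldl_append_singleton_eq_map, List.nil_append]
  set posd := List.foldl (fun (d : PySem.Dict String (List Int)) (p : Int × String) =>
      d.modify p.2 [] (fun l => l ++ [p.1])) PySem.Dict.empty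
      (PySem.List.enumerate word) with hposd
  rw [enumerate_eq word 0, List.map_map]
  refine List.map_congr_left (fun k hk => ?_)
  have hk' : k < word.length := List.mem_range.mp hk
  simp only [Function.comp_apply, zero_add]
  rw [hposd]
  exact rowB_eq deps word k hk'

-- ===== VERDICT (by name: the statement is the Claim_ definition above) =====
theorem create_word_graph_spec : Claim_equal_create_word_graph := by
  intro deps word _
  unfold Spec_create_word_graph
  rw [create_word_graph_eq_spec, create_word_graph_alt_eq_spec]
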